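-- pv_equiv track=rewrite | github.com/JakeKitchen/pennylane | pennylane/fermi/conversion.py | _flip_set
-- ===== SOURCE A (Python) =====
-- def _flip_set(j, bin_range):
--     """
--     Computes the flip set of the j-th orbital.
--
--     Args:
--         j (int): the orbital index
--         bin_range (int): smallest power of 2 equal to or greater than n
--
--     Returns:
--         list: List containing information if the phase of orbital j is same as qubit j.
--     """
--     indices = []
--     midpoint = bin_range // 2
--     if bin_range % 2 != 0:
--         return indices
--
--     if j < midpoint:
--         indices.extend(_flip_set(j, midpoint))
--     elif midpoint <= j < bin_range - 1:
--         indices.extend(u + midpoint for u in _flip_set(j - midpoint, midpoint))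
--     else:
--         indices.extend(u + midpoint for u in _flip_set(j - midpoint, midpoint))
--         indices.append(midpoint - 1)
--
--     return indices
-- ===== SOURCE B (Python) =====
-- def _flip_set(j, bin_range):
--     """Iterative flip-set: descend by halving, collecting midpoints, then reverse."""
--     out = []
--     jj, rng, offset = j, bin_range, 0
--     while rng != 0 and rng % 2 == 0:
--         mid = rng // 2
--         if jj < mid:
--             rng = mid
--         else:
--             if jj >= rng - 1:
--                 out.append(mid - 1 + offset)
--             offset += mid
--             jj -= mid
--             rng = mid
--     out.reverse()
--     return out
-- ===== Notes on version B (the rewrite author's own statement) =====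
-- stated objective: alternative
-- what changed: Replaces A's recursion on the halved range (with post-hoc +midpoint shifting of the recursive result) by a single iterative top-down halving loop that tracks the current index, range and cumulative offset and reverses the collected list at the end.
import Mathlib
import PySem

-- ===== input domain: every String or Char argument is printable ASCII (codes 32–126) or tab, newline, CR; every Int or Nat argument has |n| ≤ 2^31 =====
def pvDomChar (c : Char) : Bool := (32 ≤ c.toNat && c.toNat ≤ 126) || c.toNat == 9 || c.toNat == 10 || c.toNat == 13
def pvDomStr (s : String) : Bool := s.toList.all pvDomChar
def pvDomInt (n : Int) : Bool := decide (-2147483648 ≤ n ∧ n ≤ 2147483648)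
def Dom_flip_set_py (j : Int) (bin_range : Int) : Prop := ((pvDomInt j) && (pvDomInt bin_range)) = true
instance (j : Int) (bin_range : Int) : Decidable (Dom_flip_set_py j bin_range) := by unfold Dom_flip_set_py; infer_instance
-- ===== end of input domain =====

-- B replaces A's recursion by a single iterative halving loop (different decomposition, same cost);
-- return-value equivalence only, neither version mutates its arguments.

-- ===== PORT A =====
-- Python A recurses on bin_range // 2; fuel (natAbs bin_range + 1) only makes the
-- recursion structural — it is never exhausted when bin_range ≠ 0 (Pre_).
def flipA (fuel : Nat) (j : Int) (bin_range : Int) : List Int :=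
  match fuel with
  | 0 => []
  | fuel + 1 =>
    let midpoint := PySem.Int.floordiv bin_range 2
    if PySem.Int.mod bin_range 2 ≠ 0 then []
    else if j < midpoint then flipA fuel j midpoint
    else if midpoint ≤ j ∧ j < bin_range - 1 then (flipA fuel (j - midpoint) midpoint).map (· + midpoint)
    else (flipA fuel (j - midpoint) midpoint).map (· + midpoint) ++ [midpoint - 1]

def flip_set_py (j : Int) (bin_range : Int) : List Int :=
  flipA (bin_range.natAbs + 1) j bin_range

-- ===== PORT B =====
-- the while-loop of Source B; fuel bounds the iteration count (never exhausted for rng ≠ 0)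
def flipB (fuel : Nat) (jj rng offset : Int) (out : List Int) : List Int :=
  match fuel with
  | 0 => out
  | fuel + 1 =>
    if rng ≠ 0 ∧ PySem.Int.mod rng 2 = 0 then
      let mid := PySem.Int.floordiv rng 2
      if jj < mid then flipB fuel jj mid offset out
      else if jj ≥ rng - 1 then flipB fuel (jj - mid) mid (offset + mid) (out ++ [mid - 1 + offset])
      else flipB fuel (jj - mid) mid (offset + mid) out
    else out

def flip_set_py_alt (j : Int) (bin_range : Int) : List Int :=
  (flipB (bin_range.natAbs + 1) j bin_range 0 []).reverse

-- ===== PRECONDITION & SPEC =====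
-- Pre_ excludes only bin_range = 0, where Python A recurses forever (RecursionError).
def Pre_flip_set_py (j : Int) (bin_range : Int) : Prop := bin_range ≠ 0
instance (j : Int) (bin_range : Int) : Decidable (Pre_flip_set_py j bin_range) := by unfold Pre_flip_set_py; infer_instance
def pvWitness_flip_set_py : Int × Int := (3, 8)

def Spec_flip_set_py (j : Int) (bin_range : Int) (out : List Int) : Prop := out = flip_set_py_alt j bin_range
instance (j : Int) (bin_range : Int) (out : List Int) : Decidable (Spec_flip_set_py j bin_range out) := by unfold Spec_flip_set_py; infer_instance

-- ===== CLAIM (what is proved, stated in full; the proofs are below) =====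
def Claim_equal_flip_set_py : Prop := ∀ (j : Int) (bin_range : Int), Dom_flip_set_py j bin_range → Pre_flip_set_py j bin_range → Spec_flip_set_py j bin_range (flip_set_py j bin_range)

-- ===== LEMMAS AND PROOFS =====

-- the loop of B computes A's recursion, shifted by `offset`, in reversed order appended to `out`
theorem flipB_eq_flipA (fuel : Nat) : ∀ (jj rng offset : Int) (out : List Int), rng ≠ 0 →
    flipB fuel jj rng offset out = out ++ ((flipA fuel jj rng).map (· + offset)).reverse := by
  induction fuel with
  | zero => intro jj rng offset out _; simp [flipA, flipB]
  | succ fuel ih =>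
    intro jj rng offset out hrng
    by_cases hmod : PySem.Int.mod rng 2 = 0
    · have hmid : PySem.Int.floordiv rng 2 ≠ 0 := by
        rw [PySem.Int.floordiv_eq_ediv_of_pos (by norm_num)]
        rw [PySem.Int.mod_eq_emod_of_pos (by norm_num)] at hmod
        omega
      simp only [flipA, flipB, hmod, hrng, ne_eq, not_true_eq_false, if_false, and_true,
        not_false_eq_true, if_true]
      by_cases h1 : jj < PySem.Int.floordiv rng 2
      · simp only [h1, if_true]
        exact ih jj _ offset out hmid
      · simp only [h1, if_false, not_lt.mp h1, true_and]
        by_cases h2 : jj ≥ rng - 1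
        · have h2' : ¬ jj < rng - 1 := not_lt.mpr h2
          simp only [h2, h2', if_true, if_false]
          rw [ih _ _ _ _ hmid]
          simp [List.map_map, List.append_assoc]
          exact fun a _ => by ring
        · have h2' : jj < rng - 1 := not_le.mp h2
          simp only [h2, h2', if_true, if_false]
          rw [ih _ _ _ _ hmid]
          congr 1
          simp [List.map_map]
          exact fun a _ => by ring
    · have h2 : rng % 2 = 1 := by
        rw [PySem.Int.mod_eq_emod_of_pos (by norm_num)] at hmod; omega
      simp [flipA, flipB, hrng, h2]

-- ===== VERDICT (by name: the statement is the Claim_ definition above) =====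
theorem flip_set_py_spec : Claim_equal_flip_set_py := by
  intro j bin_range _ hpre
  unfold Spec_flip_set_py flip_set_py flip_set_py_alt
  rw [flipB_eq_flipA _ j bin_range 0 [] hpre]
  simp
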